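-- pv_equiv track=rewrite | github.com/Da5idEducator/PythonPractice-2024-2025 | gamblingPoints.py | nyeroKombo
-- ===== SOURCE A (Python) =====
-- def nyeroKombo(roll):
--     marVolt = set()
--     tobbszoros = []
--
--     for i in roll:
--         if i in marVolt:
--             tobbszoros.append(i)
--         else:
--             marVolt.add(i)
--     if len(tobbszoros) > 1:
--         azonosLapokSzama = 2
--     elif len(tobbszoros) > 0:
--         azonosLapokSzama = 1
--     else:
--         azonosLapokSzama = 0
--
--     return azonosLapokSzama
-- ===== SOURCE B (Python) =====
-- def nyeroKombo(roll):
--     s = sorted(roll)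
--     dup = sum(1 for a, b in zip(s, s[1:]) if a == b)
--     return 2 if dup > 1 else dup
-- ===== Notes on version B (the rewrite author's own statement) =====
-- stated objective: alternative
-- what changed: Replaces A's seen-set membership loop with duplicate list and branch cascade by sort-then-scan: sort the roll and count adjacent equal pairs (duplicates are adjacent after sorting), capping at 2.
import Mathlib
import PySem

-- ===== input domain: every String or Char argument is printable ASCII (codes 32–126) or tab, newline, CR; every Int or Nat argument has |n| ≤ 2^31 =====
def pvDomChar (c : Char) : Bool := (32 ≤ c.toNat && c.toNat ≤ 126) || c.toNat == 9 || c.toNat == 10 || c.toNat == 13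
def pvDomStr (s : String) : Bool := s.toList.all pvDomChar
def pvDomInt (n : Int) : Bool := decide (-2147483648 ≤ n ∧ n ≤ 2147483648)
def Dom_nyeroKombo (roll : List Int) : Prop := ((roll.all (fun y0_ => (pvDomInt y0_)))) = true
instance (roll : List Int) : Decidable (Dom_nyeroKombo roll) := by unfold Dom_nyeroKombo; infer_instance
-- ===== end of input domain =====

-- B replaces A's seen-set loop and branch cascade by sort-then-scan: sort the roll and
-- count adjacent equal pairs (duplicates become adjacent after sorting); objective: alternative.

-- ===== PORT A =====
def nyeroKombo (roll : List Int) : Int :=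
  let st := roll.foldl (fun (st : PySem.Set Int × List Int) i =>
    if PySem.Set.contains st.1 i then (st.1, st.2 ++ [i])
    else (PySem.Set.add st.1 i, st.2)) (PySem.Set.empty, [])
  let tobbszoros := st.2
  if tobbszoros.length > 1 then 2
  else if tobbszoros.length > 0 then 1
  else 0

-- ===== PORT B =====
def nyeroKombo_alt (roll : List Int) : Int :=
  let s := PySem.List.sorted roll (fun x => x) false
  let dup : Int := ((s.zip (PySem.List.slice s (some 1) none)).countP (fun p => p.1 == p.2) : Int)
  if dup > 1 then 2 else dup

-- ===== PRECONDITION & SPEC =====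
def Spec_nyeroKombo (roll : List Int) (out : Int) : Prop := out = nyeroKombo_alt roll
instance (roll : List Int) (out : Int) : Decidable (Spec_nyeroKombo roll out) := by unfold Spec_nyeroKombo; infer_instance

-- ===== CLAIM (what is proved, stated in full; the proofs are below) =====
def Claim_equal_nyeroKombo : Prop := ∀ (roll : List Int), Dom_nyeroKombo roll → Spec_nyeroKombo roll (nyeroKombo roll)

-- ===== LEMMAS AND PROOFS =====

-- A's loop invariant: first component is Set.update s roll; sizes balance.
theorem nyeroKombo_loop (roll : List Int) (s : PySem.Set Int) (t : List Int) :
    (roll.foldl (fun (st : PySem.Set Int × List Int) i =>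
      if PySem.Set.contains st.1 i then (st.1, st.2 ++ [i])
      else (PySem.Set.add st.1 i, st.2)) (s, t)).1 = PySem.Set.update s roll ∧
    ((roll.foldl (fun (st : PySem.Set Int × List Int) i =>
      if PySem.Set.contains st.1 i then (st.1, st.2 ++ [i])
      else (PySem.Set.add st.1 i, st.2)) (s, t)).2).length + (PySem.Set.update s roll).length
      = t.length + s.length + roll.length := by
  induction roll generalizing s t with
  | nil => simp [PySem.Set.update]
  | cons i rest ih =>
    by_cases hc : PySem.Set.contains s i = true
    · have h : i ∈ s := by simpa [PySem.Set.contains] using hc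
      have hadd : PySem.Set.add s i = s := by simp [PySem.Set.add, PySem.Set.contains, h]
      obtain ⟨ih1, ih2⟩ := ih s (t ++ [i])
      simp only [List.foldl_cons, if_pos hc, PySem.Set.update, hadd] at *
      refine ⟨ih1, ?_⟩
      simp only [List.length_append, List.length_cons, List.length_nil] at ih2 ⊢
      omega
    · have h : i ∉ s := by simpa [PySem.Set.contains] using hc
      have hadd : PySem.Set.add s i = s ++ [i] := by simp [PySem.Set.add, PySem.Set.contains, h]
      obtain ⟨ih1, ih2⟩ := ih (PySem.Set.add s i) t
      simp only [List.foldl_cons, if_neg hc, PySem.Set.update] at *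
      refine ⟨ih1, ?_⟩
      have hl : (PySem.Set.add s i).length = s.length + 1 := by simp [hadd]
      simp only [List.length_cons] at ih2 ⊢
      omega

-- in a ≤-sorted list, adjacent-equal pairs + distinct elements = length
theorem adj_count_sorted (l : List Int) (hp : l.Pairwise (· ≤ ·)) :
    ((l.zip l.tail).countP (fun p => p.1 == p.2)) + l.toFinset.card = l.length := by
  induction l with
  | nil => simp
  | cons a t ih =>
    cases t with
    | nil => simp
    | cons b t' =>
      have hp' : (b :: t').Pairwise (· ≤ ·) := (List.pairwise_cons.mp hp).2
      have hab : a ≤ b := (List.pairwise_cons.mp hp).1 b (by simp)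
      have ihv := ih hp'
      by_cases hab' : a = b
      · subst hab'
        have hmem : a ∈ (a :: t').toFinset := by simp
        have : (a :: a :: t').toFinset = (a :: t').toFinset := by
          simp [List.toFinset_cons, Finset.insert_eq_self.mpr]
        simp only [List.tail_cons, List.zip_cons_cons, List.countP_cons, this] at *
        simp only [List.length_cons] at *
        simp only [beq_self_eq_true, if_pos] at *
        omega
      · have halt : a < b := lt_of_le_of_ne hab hab'
        have hnot : a ∉ (b :: t') := by
          intro hmem
          rcases List.mem_cons.mp hmem with h | h
          · exact hab' h
          · have hb : ∀ x ∈ t', b ≤ x := (List.pairwise_cons.mp hp').1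
            exact absurd rfl (ne_of_lt (lt_of_lt_of_le halt (hb a h)))
        have hcard : (a :: b :: t').toFinset.card = (b :: t').toFinset.card + 1 := by
          have hnf : a ∉ insert b t'.toFinset := by
            simp only [Finset.mem_insert, List.mem_toFinset]
            push Not
            exact ⟨hab', fun h => hnot (List.mem_cons_of_mem _ h)⟩
          simp [List.toFinset_cons, Finset.card_insert_of_notMem hnf]
        have hbeq : ((a, b).1 == (a, b).2) = false := by simpa using hab'
        simp only [List.tail_cons, List.zip_cons_cons, List.countP_cons, hcard] at *
        simp only [List.length_cons] at *
        simp [hbeq] at *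
        omega

-- Set.ofList length = toFinset card
theorem ofList_length_card (l : List Int) :
    (PySem.Set.ofList l).length = l.toFinset.card := by
  have hnd : (PySem.Set.ofList l).Nodup := PySem.Set.nodup_ofList l
  have hfs : (PySem.Set.ofList l).toFinset = l.toFinset := by
    ext x; simp [List.mem_toFinset, PySem.Set.mem_ofList]
  rw [← List.toFinset_card_of_nodup hnd, hfs]

-- ===== VERDICT (by name: the statement is the Claim_ definition above) =====
theorem nyeroKombo_spec : Claim_equal_nyeroKombo := by
  intro roll _
  unfold Spec_nyeroKombo nyeroKombo nyeroKombo_alt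
  have hloop := nyeroKombo_loop roll PySem.Set.empty []
  obtain ⟨-, h2⟩ := hloop
  have hofl : PySem.Set.ofList roll = PySem.Set.update PySem.Set.empty roll :=
    PySem.Set.ofList_eq_foldl roll
  set s := PySem.List.sorted roll (fun x => x) false with hs
  have hperm : s.Perm roll := PySem.List.sorted_perm roll (fun x => x) false
  have hpw : s.Pairwise (· ≤ ·) := by
    simpa using PySem.List.sorted_pairwise roll (fun x => x)
  have hadj := adj_count_sorted s hpw
  have hslice : PySem.List.slice s (some 1) none = s.tail := PySem.List.slice_from_one s
  have hfs : s.toFinset = roll.toFinset := by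
    ext x; simp [List.mem_toFinset, hperm.mem_iff]
  have hlen : s.length = roll.length := hperm.length_eq
  have hcard := ofList_length_card roll
  rw [← hofl] at h2
  -- both counts equal roll.length - distinct count
  have key : ((s.zip s.tail).countP (fun p => p.1 == p.2))
      = (roll.foldl (fun (st : PySem.Set Int × List Int) i =>
          if PySem.Set.contains st.1 i then (st.1, st.2 ++ [i])
          else (PySem.Set.add st.1 i, st.2)) (PySem.Set.empty, [])).2.length := by
    rw [hfs, hlen, ← hcard] at hadj
    have hemp : (PySem.Set.empty : PySem.Set Int).length = 0 := rfl
    have hnil : ([] : List Int).length = 0 := rfl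
    omega
  simp only [hslice, key]
  split_ifs <;> omega
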